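-- pv_equiv track=rewrite | github.com/VSGroupe/Api_Performance_RSE_SIFCA | utils.py | indexes_by
-- ===== SOURCE A (Python) =====
-- def indexes_by(dicts_list, value):
--     indexes_dict = {}
--     for index, d in enumerate(dicts_list):
--         tempVal = d[f'{value}']
--         if tempVal is not None:
--             if tempVal in indexes_dict:
--                 indexes_dict[tempVal].append(index)
--             else:
--                 indexes_dict[tempVal] = [index]
--     return list(indexes_dict.values())
-- ===== SOURCE B (Python) =====
-- def indexes_by(dicts_list, value):
--     key = f'{value}'
--     seen = set()
--     distinct = []
--     for d in dicts_list:
--         v = d[key]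
--         if v is not None and v not in seen:
--             seen.add(v)
--             distinct.append(v)
--     return [[i for i, d in enumerate(dicts_list)
--              if d[key] is not None and d[key] == v]
--             for v in distinct]
-- ===== Notes on version B (the rewrite author's own statement) =====
-- stated objective: alternative
-- what changed: A builds the index groups in one pass with a value-keyed dict of growing lists; B first collects the distinct non-None values in first-occurrence order with a seen-set, then makes a separate enumerate rescan per distinct value to collect its indexes.
import Mathlib
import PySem

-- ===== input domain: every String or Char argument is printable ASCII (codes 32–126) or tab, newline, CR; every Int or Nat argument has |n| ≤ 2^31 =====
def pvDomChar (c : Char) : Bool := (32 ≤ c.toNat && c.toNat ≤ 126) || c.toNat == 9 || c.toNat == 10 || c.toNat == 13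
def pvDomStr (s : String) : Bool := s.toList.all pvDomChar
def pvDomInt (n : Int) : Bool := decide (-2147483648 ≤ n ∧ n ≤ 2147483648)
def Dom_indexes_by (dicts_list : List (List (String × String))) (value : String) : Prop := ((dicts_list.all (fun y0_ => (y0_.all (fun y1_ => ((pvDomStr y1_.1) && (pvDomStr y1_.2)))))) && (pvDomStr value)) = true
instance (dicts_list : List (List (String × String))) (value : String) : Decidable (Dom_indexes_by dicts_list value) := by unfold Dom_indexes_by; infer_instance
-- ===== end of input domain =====

-- B replaces A's single grouping-dict pass by an ordered-distinct-values pass plus one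
-- enumerate rescan per distinct value (objective: alternative decomposition, not faster).
-- Dict values are Strings under the type convention, so Python's 'is not None' guard is vacuous in the ports.

-- ===== PORT A =====
-- one grouping pass: dict from value to list of indexes, built with append-or-new-entry
def indexes_by (dicts_list : List (List (String × String))) (value : String) : List (List Int) :=
  let indexes_dict : PySem.Dict String (List Int) :=
    (PySem.List.enumerate dicts_list).foldl
      (fun acc p =>
        match (PySem.Dict.mk p.2).get? value with   -- d[f'{value}']; none = KeyError, excluded by Pre_
        | none => acc
        | some tempVal =>
            if acc.contains tempVal then acc.modify tempVal [] (fun l => l ++ [p.1])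
            else acc.insert tempVal [p.1])
      PySem.Dict.empty
  indexes_dict.values

-- ===== PORT B =====
-- seen-set/distinct-list loop = ordered dedup of the looked-up values (PySem.List.dedup),
-- then one enumerate comprehension per distinct value
def indexes_by_alt (dicts_list : List (List (String × String))) (value : String) : List (List Int) :=
  let distinct : List String :=
    PySem.List.dedup (dicts_list.filterMap (fun d => (PySem.Dict.mk d).get? value))
  distinct.map (fun v =>
    ((PySem.List.enumerate dicts_list).filter
      (fun p => (PySem.Dict.mk p.2).get? value == some v)).map (fun p => p.1))

-- ===== PRECONDITION & SPEC =====
-- Pre_ excludes exactly the inputs on which Python A raises KeyError: some dict lacking the key.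
def Pre_indexes_by (dicts_list : List (List (String × String))) (value : String) : Prop :=
  ∀ d ∈ dicts_list, value ∈ d.map Prod.fst
instance (dicts_list : List (List (String × String))) (value : String) : Decidable (Pre_indexes_by dicts_list value) := by unfold Pre_indexes_by; infer_instance

def pvWitness_indexes_by : (List (List (String × String))) × String :=
  ([[("k", "a"), ("o", "z")], [("k", "b")], [("k", "a")]], "k")

def Spec_indexes_by (dicts_list : List (List (String × String))) (value : String) (out : List (List Int)) : Prop := out = indexes_by_alt dicts_list value
instance (dicts_list : List (List (String × String))) (value : String) (out : List (List Int)) : Decidable (Spec_indexes_by dicts_list value out) := by unfold Spec_indexes_by; infer_instance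

-- ===== CLAIM (what is proved, stated in full; the proofs are below) =====
def Claim_equal_indexes_by : Prop := ∀ (dicts_list : List (List (String × String))) (value : String), Dom_indexes_by dicts_list value → Pre_indexes_by dicts_list value → Spec_indexes_by dicts_list value (indexes_by dicts_list value)

-- ===== LEMMAS AND PROOFS =====

-- A's append-or-new-entry branch IS Dict.modify with default []
theorem pv_step_eq_modify (d : PySem.Dict String (List Int)) (k : String) (i : Int) :
    (if d.contains k then d.modify k [] (fun l => l ++ [i]) else d.insert k [i]) =
      d.modify k [] (fun l => l ++ [i]) := by
  by_cases h : d.contains k = true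
  · simp [h]
  · simp only [Bool.not_eq_true] at h
    simp [h, PySem.Dict.modify, PySem.Dict.getD_of_not_contains d _ h]

-- generic grouping fact on a list of (index, value) pairs: the values of the grouping dict
-- are, per distinct value in first-occurrence order, the indexes carrying that value
theorem pv_group_values (l : List (Int × String)) :
    (l.foldl (fun acc p => acc.modify p.2 [] (fun t => t ++ [p.1])) PySem.Dict.empty).values =
      (PySem.List.dedup (l.map Prod.snd)).map
        (fun v => (l.filter (fun p => p.2 == v)).map Prod.fst) := by
  have hnd : (l.foldl (fun acc p => acc.modify p.2 [] (fun t => t ++ [p.1])) PySem.Dict.empty).keys.Nodup :=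
    PySem.Dict.nodup_keys_foldl_modify_key l Prod.snd [] (fun _ p => fun t => t ++ [p.1]) _ (by simp)
  rw [PySem.Dict.values_eq_map_keys _ hnd []]
  have hkeys : (l.foldl (fun acc p => acc.modify p.2 [] (fun t => t ++ [p.1])) PySem.Dict.empty).keys
      = PySem.List.dedup (l.map Prod.snd) := by
    rw [PySem.Dict.keys_foldl_modify_key l Prod.snd [] (fun _ p => fun t => t ++ [p.1])]
    simp [PySem.List.dedup_eq_ofList, PySem.Set.ofList, PySem.Set.update, PySem.Dict.keys, PySem.Dict.empty]
  rw [hkeys]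
  apply List.map_congr_left
  intro v hv
  have hswap : (l.foldl (fun acc p => acc.modify p.2 [] (fun t => t ++ [p.1])) PySem.Dict.empty)
      = ((l.map Prod.swap).foldl (fun d p => d.modify p.1 [] (fun t => t ++ [p.2])) PySem.Dict.empty) := by
    rw [List.foldl_map]; rfl
  rw [hswap, PySem.Dict.getD_foldl_modify_append]
  simp [List.filter_map, Function.comp_def, List.map_map]

-- under Pre_, every lookup succeeds (and returns its own getD "")
theorem pv_lookup_some (dl : List (List (String × String))) (value : String)
    (hpre : ∀ d ∈ dl, value ∈ d.map Prod.fst) (d : List (String × String)) (hd : d ∈ dl) :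
    (PySem.Dict.mk d).get? value = some (((PySem.Dict.mk d).get? value).getD "") := by
  have hne : (PySem.Dict.mk d).get? value ≠ none := by
    rw [Ne, PySem.Dict.get?_eq_none_iff_not_mem_keys]
    simp only [PySem.Dict.keys_mk, not_not]
    exact hpre d hd
  cases h : (PySem.Dict.mk d).get? value with
  | none => exact absurd h hne
  | some w => simp

theorem pv_main (dl : List (List (String × String))) (value : String)
    (hpre : ∀ d ∈ dl, value ∈ d.map Prod.fst) :
    indexes_by dl value = indexes_by_alt dl value := by
  set val := fun d : List (String × String) => ((PySem.Dict.mk d).get? value).getD "" with hval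
  have hsnd : ∀ p ∈ PySem.List.enumerate dl 0, p.2 ∈ dl := by
    intro p hp
    have := PySem.List.map_snd_enumerate dl 0
    rw [← this]
    exact List.mem_map_of_mem hp
  have hlook : ∀ p ∈ PySem.List.enumerate dl 0,
      (PySem.Dict.mk p.2).get? value = some (val p.2) :=
    fun p hp => pv_lookup_some dl value hpre p.2 (hsnd p hp)
  set l := (PySem.List.enumerate dl 0).map (fun p => (p.1, val p.2)) with hl
  -- A side: the grouping fold over enumerate equals the uniform modify-fold over l
  have hA : indexes_by dl value =
      (l.foldl (fun acc p => acc.modify p.2 [] (fun t => t ++ [p.1])) PySem.Dict.empty).values := by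
    show (List.foldl _ PySem.Dict.empty (PySem.List.enumerate dl)).values = _
    rw [hl, List.foldl_map]
    congr 1
    apply PySem.List.foldl_congr_mem
    intro acc p hp
    rw [hlook p hp]
    exact pv_step_eq_modify acc (val p.2) p.1
  rw [hA, pv_group_values]
  -- B side: rewrite the distinct-values list and the per-value rescans onto l
  unfold indexes_by_alt
  have hdist : dl.filterMap (fun d => (PySem.Dict.mk d).get? value) = dl.map val := by
    apply List.filterMap_eq_map_iff_forall_eq_some.mpr
    intro d hd; exact pv_lookup_some dl value hpre d hd
  have hvals : l.map Prod.snd = dl.map val := by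
    rw [hl, List.map_map]
    conv_rhs => rw [← PySem.List.map_snd_enumerate dl 0, List.map_map]
    rfl
  rw [hdist, ← hvals]
  apply List.map_congr_left
  intro v hv
  rw [hl, List.filter_map, List.map_map]
  have hfc : ((PySem.List.enumerate dl 0).filter
      (fun p => (PySem.Dict.mk p.2).get? value == some v)) =
      ((PySem.List.enumerate dl 0).filter
      ((fun p : Int × String => p.2 == v) ∘ fun p => (p.1, val p.2))) := by
    apply List.filter_congr
    intro p hp
    rw [hlook p hp]
    simp
  rw [hfc]
  rfl

-- ===== VERDICT (by name: the statement is the Claim_ definition above) =====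
theorem indexes_by_spec : Claim_equal_indexes_by := by
  intro dl value _ hpre
  unfold Spec_indexes_by
  exact pv_main dl value hpre
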